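-- pv_equiv track=rewrite | github.com/TheLitis/AGI | repo_tool_env.py | _pytest_failure_signature
-- ===== SOURCE A (Python) =====
-- def _pytest_failure_signature(output: str) -> str:
--     """
--     Best-effort compact signature to hash into discrete token buckets.
--     """
--     text = (output or "").strip()
--     if not text:
--         return ""
--     if "[timeout]" in text:
--         return "timeout"
--     for line in text.splitlines():
--         s = line.strip()
--         if s.startswith("FAILED ") or s.startswith("ERROR "):
--             return s
--     for line in reversed(text.splitlines()):
--         s = line.strip()
--         if s:
--             return s
--     return ""
-- ===== SOURCE B (Python) =====
-- def _pytest_failure_signature(output: str) -> str: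
--     """
--     Best-effort compact signature to hash into discrete token buckets.
--     One backward pass over the lines with two accumulators: `fail` is
--     overwritten by every FAILED/ERROR line seen (so it ends up holding the
--     forward-first such line), `last` records the first non-empty non-FAILED
--     line seen (= the forward-last non-empty line).
--     """
--     text = (output or "").strip()
--     if not text:
--         return ""
--     if "[timeout]" in text:
--         return "timeout"
--     fail = last = None
--     for line in reversed(text.splitlines()):
--         s = line.strip()
--         if s.startswith(("FAILED ", "ERROR ")):
--             fail = s
--         elif s and last is None:
--             last = s
--     return fail if fail is not None else (last or "")
-- ===== Notes on version B (the rewrite author's own statement) =====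
-- stated objective: alternative
-- what changed: Replaces A's two staged scans (forward scan returning the first FAILED/ERROR line, then a reversed scan for the last non-empty line) with a single backward traversal maintaining two accumulators (the rightmost-seen FAILED/ERROR line, which ends as the forward-first one, and the first non-empty non-FAILED line seen), choosing between them afterwards.
import Mathlib
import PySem

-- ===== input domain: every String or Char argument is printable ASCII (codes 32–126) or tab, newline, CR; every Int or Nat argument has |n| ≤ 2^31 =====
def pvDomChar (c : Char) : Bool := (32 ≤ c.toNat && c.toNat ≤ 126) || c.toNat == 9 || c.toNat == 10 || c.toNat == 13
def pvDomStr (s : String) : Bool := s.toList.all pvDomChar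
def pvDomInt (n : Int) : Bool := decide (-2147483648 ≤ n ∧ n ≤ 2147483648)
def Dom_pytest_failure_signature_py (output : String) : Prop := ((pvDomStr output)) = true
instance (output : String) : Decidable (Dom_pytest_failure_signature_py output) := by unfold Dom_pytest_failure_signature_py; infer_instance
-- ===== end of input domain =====

-- B replaces A's two staged scans (forward for the first FAILED/ERROR line, then reversed for
-- the last non-empty line) with one backward traversal carrying two accumulators (objective: alternative).

-- ===== PORT A =====
-- first loop: return the first stripped line starting with "FAILED " or "ERROR "
def pvALoop1 : List String → Option String
  | [] => none
  | l :: rest =>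
    let s := PySem.Str.strip l
    if PySem.Str.startswith s "FAILED " || PySem.Str.startswith s "ERROR " then some s
    else pvALoop1 rest

-- second loop (over the reversed lines): return the first non-empty stripped line; else ""
def pvALoop2 : List String → String
  | [] => ""
  | l :: rest =>
    let s := PySem.Str.strip l
    if s ≠ "" then s else pvALoop2 rest

def pytest_failure_signature_py (output : String) : String :=
  let text := PySem.Str.strip output
  if text = "" then ""
  else if PySem.Str.isIn "[timeout]" text then "timeout"
  else
    match pvALoop1 (PySem.Str.splitlines text) with
    | some s => s
    | none => pvALoop2 (PySem.Str.splitlines text).reverse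

-- ===== PORT B =====
-- single backward pass: `fail` overwritten by each FAILED/ERROR line,
-- `last` set once to the first non-empty non-FAILED line encountered.
def pvBScan : List String → Option String → Option String → String
  | [], fail, last =>
    (match fail with
     | some f => f
     | none =>
       match last with
       | some t => t
       | none => "")
  | l :: rest, fail, last =>
    let s := PySem.Str.strip l
    if PySem.Str.startswith s "FAILED " || PySem.Str.startswith s "ERROR " then
      pvBScan rest (some s) last
    else if s != "" && last.isNone then
      pvBScan rest fail (some s)
    else
      pvBScan rest fail last

def pytest_failure_signature_py_alt (output : String) : String :=
  let text := PySem.Str.strip output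
  if text = "" then ""
  else if PySem.Str.isIn "[timeout]" text then "timeout"
  else pvBScan (PySem.Str.splitlines text).reverse none none

-- ===== PRECONDITION & SPEC =====
def Spec_pytest_failure_signature_py (output : String) (out : String) : Prop := out = pytest_failure_signature_py_alt output
instance (output : String) (out : String) : Decidable (Spec_pytest_failure_signature_py output out) := by unfold Spec_pytest_failure_signature_py; infer_instance

-- ===== CLAIM (what is proved, stated in full; the proofs are below) =====
def Claim_equal_pytest_failure_signature_py : Prop := ∀ (output : String), Dom_pytest_failure_signature_py output → Spec_pytest_failure_signature_py output (pytest_failure_signature_py output)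

-- ===== LEMMAS AND PROOFS =====

-- proof-side: the stripped-line FAILED/ERROR test
def pvIsFail (l : String) : Bool :=
  PySem.Str.startswith (PySem.Str.strip l) "FAILED " || PySem.Str.startswith (PySem.Str.strip l) "ERROR "

-- proof-side: first non-empty non-FAILED stripped line, as an Option
def pvFirst : List String → Option String
  | [] => none
  | l :: rest =>
    if pvIsFail l then pvFirst rest
    else if PySem.Str.strip l ≠ "" then some (PySem.Str.strip l) else pvFirst rest

theorem pvALoop1_append (ys : List String) (x : String) :
    pvALoop1 (ys ++ [x]) =
      (pvALoop1 ys).or (if pvIsFail x then some (PySem.Str.strip x) else none) := by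
  induction ys with
  | nil => simp only [List.nil_append, pvALoop1, pvIsFail]; split <;> simp
  | cons l rest ih =>
    simp only [List.cons_append, pvALoop1]
    split <;> simp [ih]

theorem pvALoop1_none_iff (xs : List String) :
    pvALoop1 xs = none ↔ ∀ l ∈ xs, pvIsFail l = false := by
  induction xs with
  | nil => simp [pvALoop1]
  | cons l rest ih =>
    simp only [pvALoop1, List.mem_cons]
    by_cases h : pvIsFail l = true
    · have h' : (PySem.Str.startswith (PySem.Str.strip l) "FAILED "
          || PySem.Str.startswith (PySem.Str.strip l) "ERROR ") = true := h
      simp only [h']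
      constructor
      · intro hc; cases hc
      · intro hall; exact absurd (hall l (Or.inl rfl)) (by simp [h])
    · have h' : (PySem.Str.startswith (PySem.Str.strip l) "FAILED "
          || PySem.Str.startswith (PySem.Str.strip l) "ERROR ") = false := by
        simpa [pvIsFail] using h
      rw [h']
      simp only [Bool.false_eq_true, if_false, ih]
      constructor
      · rintro hall l' (rfl | hm)
        · simpa [pvIsFail] using h
        · exact hall l' hm
      · intro hall l' hm; exact hall l' (Or.inr hm)

theorem pvALoop2_eq_pvFirst (xs : List String)
    (h : ∀ l ∈ xs, pvIsFail l = false) :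
    pvALoop2 xs = (pvFirst xs).getD "" := by
  induction xs with
  | nil => rfl
  | cons l rest ih =>
    have hl : pvIsFail l = false := h l (List.mem_cons_self ..)
    simp only [pvALoop2, pvFirst, hl, Bool.false_eq_true, if_false]
    split
    · rfl
    · exact ih (fun l' hm => h l' (List.mem_cons_of_mem _ hm))

-- invariant of B's backward scan against A's two loops
theorem pvBScan_eq (xs : List String) : ∀ (fail last : Option String),
    pvBScan xs fail last =
      (match pvALoop1 xs.reverse with
       | some t => t
       | none => (fail.or (last.or (pvFirst xs))).getD "") := by
  induction xs with
  | nil => intro fail last; cases fail <;> cases last <;> rfl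
  | cons l rest ih =>
    intro fail last
    rw [show (l :: rest).reverse = rest.reverse ++ [l] from by simp, pvALoop1_append]
    by_cases hf : pvIsFail l = true
    · have hf' : (PySem.Str.startswith (PySem.Str.strip l) "FAILED "
          || PySem.Str.startswith (PySem.Str.strip l) "ERROR ") = true := hf
      simp only [pvBScan, hf', hf]
      rw [ih]
      cases pvALoop1 rest.reverse <;> simp [Option.or]
    · have hf' : (PySem.Str.startswith (PySem.Str.strip l) "FAILED "
          || PySem.Str.startswith (PySem.Str.strip l) "ERROR ") = false := by
        simpa [pvIsFail] using hf
      have hfi : pvIsFail l = false := by simpa [pvIsFail] using hf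
      simp only [pvBScan, hf', hfi, Bool.false_eq_true, if_false, Option.or_none]
      by_cases hb : (PySem.Str.strip l != "" && last.isNone) = true
      · have hlast : last = none := by
          cases last with
          | none => rfl
          | some t => simp at hb
        have hs : PySem.Str.strip l ≠ "" := by
          subst hlast; simpa using hb
        subst hlast
        rw [if_pos hb, ih]
        simp only [pvFirst, hfi, Bool.false_eq_true, if_false, if_pos hs, Option.none_or]
        cases pvALoop1 rest.reverse <;> cases fail <;> simp [Option.or]
      · rw [if_neg hb, ih]
        cases last with
        | some t =>
          cases pvALoop1 rest.reverse <;> cases fail <;> simp [Option.or]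
        | none =>
          have hs : PySem.Str.strip l = "" := by
            by_contra hcon
            exact hb (by simp [hcon])
          simp [pvFirst, hfi, hs]

-- ===== VERDICT (by name: the statement is the Claim_ definition above) =====
theorem pytest_failure_signature_py_spec : Claim_equal_pytest_failure_signature_py := by
  intro output _
  unfold Spec_pytest_failure_signature_py pytest_failure_signature_py pytest_failure_signature_py_alt
  simp only []
  split
  · rfl
  · split
    · rfl
    · rw [pvBScan_eq]
      rw [List.reverse_reverse]
      cases hA : pvALoop1 (PySem.Str.splitlines (PySem.Str.strip output)) with
      | some t => simp
      | none =>
        simp only [Option.none_or]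
        have hnf := (pvALoop1_none_iff _).mp hA
        have hnf' : ∀ l ∈ (PySem.Str.splitlines (PySem.Str.strip output)).reverse,
            pvIsFail l = false := fun l hm => hnf l (List.mem_reverse.mp hm)
        rw [pvALoop2_eq_pvFirst _ hnf']
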